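-- pv_equiv track=rewrite | github.com/YoungBaymax/qrs_detector | python/detection.py | _low_pass_filter
-- ===== SOURCE A (Python) =====
-- def _low_pass_filter(signal):
--     result = []
--     for index, value in enumerate(signal):
--         if index >= 1:
--             value += 2 * result[index - 1]
--         if index >= 2:
--             value -= result[index - 2]
--         if index >= 6:
--             value -= 2 * signal[index - 6]
--         if index >= 12:
--             value += signal[index - 12]
--         result.append(value)
--     return result
-- ===== SOURCE B (Python) =====
-- def _low_pass_filter(sig):
--     # FIR form: the IIR transfer function factors as (1+z^-1+...+z^-5)^2,
--     # i.e. convolution with the 11-tap triangular kernel below.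
--     kernel = (1, 2, 3, 4, 5, 6, 5, 4, 3, 2, 1)
--     out = []
--     for i in range(len(sig)):
--         acc = 0
--         for j, w in enumerate(kernel):
--             if i - j >= 0:
--                 acc += w * sig[i - j]
--         out.append(acc)
--     return out
-- ===== Notes on version B (the rewrite author's own statement) =====
-- stated objective: alternative
-- what changed: Replaced the recursive IIR update (each output built from the two previous outputs plus delayed inputs) with a direct FIR convolution: each output is the dot product of the fixed 11-tap triangular kernel (weights rising 1..6 then falling back to 1) with the last 11 input samples, with no dependence on previously computed outputs.
import Mathlib
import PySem

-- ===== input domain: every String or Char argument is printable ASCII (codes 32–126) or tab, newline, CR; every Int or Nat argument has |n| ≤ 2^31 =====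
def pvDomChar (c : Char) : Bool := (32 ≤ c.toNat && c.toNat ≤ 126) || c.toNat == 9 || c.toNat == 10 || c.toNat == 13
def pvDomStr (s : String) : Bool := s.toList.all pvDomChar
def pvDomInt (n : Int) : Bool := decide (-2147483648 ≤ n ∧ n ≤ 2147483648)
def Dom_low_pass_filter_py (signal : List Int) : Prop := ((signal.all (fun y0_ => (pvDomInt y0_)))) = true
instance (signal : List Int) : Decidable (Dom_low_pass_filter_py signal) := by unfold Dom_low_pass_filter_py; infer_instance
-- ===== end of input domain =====

-- B replaces A's recursive IIR update with a direct FIR convolution by a fixed 11-tap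
-- triangular kernel (alternative decomposition, same O(n) cost).

-- ===== PORT A =====
-- the loop body of A; indexing result[index-1] etc. is always in range, so pyGetD is exact
def lpfStep (signal : List Int) (result : List Int) (p : Int × Int) : List Int :=
  let index := p.1
  let v1 := if index ≥ 1 then p.2 + 2 * PySem.List.pyGetD result (index - 1) 0 else p.2
  let v2 := if index ≥ 2 then v1 - PySem.List.pyGetD result (index - 2) 0 else v1
  let v3 := if index ≥ 6 then v2 - 2 * PySem.List.pyGetD signal (index - 6) 0 else v2
  let v4 := if index ≥ 12 then v3 + PySem.List.pyGetD signal (index - 12) 0 else v3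
  result ++ [v4]

def low_pass_filter_py (signal : List Int) : List Int :=
  (PySem.List.enumerate signal).foldl (lpfStep signal) []

-- ===== PORT B =====
def lpfKernel : List Int := [1, 2, 3, 4, 5, 6, 5, 4, 3, 2, 1]

-- inner loop of B: fold over the enumerated kernel taps
def lpfTaps (signal : List Int) (i : Int) : List (Int × Int) → Int → Int
  | [], acc => acc
  | (j, w) :: rest, acc =>
      lpfTaps signal i rest
        (if i - j ≥ 0 then acc + w * PySem.List.pyGetD signal (i - j) 0 else acc)

def low_pass_filter_py_alt (signal : List Int) : List Int :=
  (PySem.List.pyRange 0 signal.length 1).map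
    (fun i => lpfTaps signal i (PySem.List.enumerate lpfKernel) 0)

-- ===== PRECONDITION & SPEC =====
def Spec_low_pass_filter_py (signal : List Int) (out : List Int) : Prop := out = low_pass_filter_py_alt signal
instance (signal : List Int) (out : List Int) : Decidable (Spec_low_pass_filter_py signal out) := by unfold Spec_low_pass_filter_py; infer_instance

-- ===== CLAIM (what is proved, stated in full; the proofs are below) =====
def Claim_equal_low_pass_filter_py : Prop := ∀ (signal : List Int), Dom_low_pass_filter_py signal → Spec_low_pass_filter_py signal (low_pass_filter_py signal)

-- ===== LEMMAS AND PROOFS =====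

-- zero-padded read of the signal
def pvg (s : List Int) (k : Int) : Int := if 0 ≤ k then s.getD k.toNat 0 else 0

-- the FIR value at (integer) position k
def pvF (s : List Int) (k : Int) : Int :=
  pvg s k + 2 * pvg s (k - 1) + 3 * pvg s (k - 2) + 4 * pvg s (k - 3) + 5 * pvg s (k - 4)
    + 6 * pvg s (k - 5) + 5 * pvg s (k - 6) + 4 * pvg s (k - 7) + 3 * pvg s (k - 8)
    + 2 * pvg s (k - 9) + pvg s (k - 10)

lemma pvg_neg (s : List Int) (k : Int) (h : k < 0) : pvg s k = 0 := by
  simp [pvg]; omega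

lemma pvF_neg (s : List Int) (k : Int) (h : k < 0) : pvF s k = 0 := by
  simp [pvF, pvg_neg s _ (by omega : k < 0), pvg_neg s (k-1) (by omega), pvg_neg s (k-2) (by omega),
    pvg_neg s (k-3) (by omega), pvg_neg s (k-4) (by omega), pvg_neg s (k-5) (by omega),
    pvg_neg s (k-6) (by omega), pvg_neg s (k-7) (by omega), pvg_neg s (k-8) (by omega),
    pvg_neg s (k-9) (by omega), pvg_neg s (k-10) (by omega)]

lemma pvg_eq_pyGetD (s : List Int) (k : Int) (h : 0 ≤ k) :
    PySem.List.pyGetD s k 0 = pvg s k := by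
  simp [pvg, h, PySem.List.pyGetD, PySem.List.pyGet?, PySem.List.pyIdx?]
  split_ifs with hk
  · simp
  · rw [List.getElem?_eq_none (by omega)]
    simp

-- the IIR recurrence holds for the FIR value, unconditionally over Int
lemma pvF_rec (s : List Int) (k : Int) :
    pvF s k = pvg s k + 2 * pvF s (k - 1) - pvF s (k - 2) - 2 * pvg s (k - 6) + pvg s (k - 12) := by
  simp only [pvF]
  ring_nf

-- spec sum for B's tap fold
def pvS (s : List Int) (i : Int) : List (Int × Int) → Int
  | [] => 0
  | (j, w) :: rest => w * pvg s (i - j) + pvS s i rest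

lemma taps_eq (s : List Int) (i : Int) :
    ∀ (ps : List (Int × Int)) (acc : Int), lpfTaps s i ps acc = acc + pvS s i ps := by
  intro ps
  induction ps with
  | nil => intro acc; simp [lpfTaps, pvS]
  | cons p rest ih =>
      intro acc
      obtain ⟨j, w⟩ := p
      by_cases h : i - j ≥ 0
      · rw [lpfTaps, if_pos h, ih]
        rw [pvg_eq_pyGetD s (i - j) (by omega)] at *
        simp [pvS]; ring
      · rw [lpfTaps, if_neg h, ih]
        simp [pvS, pvg_neg s (i - j) (by omega)]

lemma taps_kernel (s : List Int) (i : Int) :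
    lpfTaps s i (PySem.List.enumerate lpfKernel) 0 = pvF s i := by
  rw [taps_eq]
  simp [lpfKernel, PySem.List.enumerate, pvS, pvF]
  ring_nf

lemma pvg_natCast (s : List Int) (n : Nat) : pvg s (n : Int) = s.getD n 0 := by
  simp [pvg]

lemma chain_val (s : List Int) (n : Nat) (r : List Int)
    (hr : r = (PySem.List.pyRange 0 (n : Int) 1).map (fun i => pvF s i)) :
    lpfStep s r ((n : Int), s.getD n 0) = r ++ [pvF s (n : Int)] := by
  have hread : ∀ k : Int, 0 ≤ k → k < (n : Int) → PySem.List.pyGetD r k 0 = pvF s k := by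
    intro k h1 h2
    rw [hr]
    exact PySem.List.pyGetD_map_pyRange_of_nonneg _ _ _ _ h1 h2
  unfold lpfStep
  simp only []
  have e1 : (if ((n : Int)) ≥ 1 then s.getD n 0 + 2 * PySem.List.pyGetD r ((n : Int) - 1) 0
      else s.getD n 0) = pvg s (n : Int) + 2 * pvF s ((n : Int) - 1) := by
    by_cases h : ((n : Int)) ≥ 1
    · rw [if_pos h, hread _ (by omega) (by omega), pvg_natCast]
    · rw [if_neg h, pvF_neg s _ (by omega), pvg_natCast]; ring
  have e2 : ∀ X : Int, (if ((n : Int)) ≥ 2 then X - PySem.List.pyGetD r ((n : Int) - 2) 0 else X)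
      = X - pvF s ((n : Int) - 2) := by
    intro X
    by_cases h : ((n : Int)) ≥ 2
    · rw [if_pos h, hread _ (by omega) (by omega)]
    · rw [if_neg h, pvF_neg s _ (by omega)]; ring
  have e6 : ∀ X : Int, (if ((n : Int)) ≥ 6 then X - 2 * PySem.List.pyGetD s ((n : Int) - 6) 0 else X)
      = X - 2 * pvg s ((n : Int) - 6) := by
    intro X
    by_cases h : ((n : Int)) ≥ 6
    · rw [if_pos h, pvg_eq_pyGetD s _ (by omega)]
    · rw [if_neg h, pvg_neg s _ (by omega)]; ring
  have e12 : ∀ X : Int, (if ((n : Int)) ≥ 12 then X + PySem.List.pyGetD s ((n : Int) - 12) 0 else X)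
      = X + pvg s ((n : Int) - 12) := by
    intro X
    by_cases h : ((n : Int)) ≥ 12
    · rw [if_pos h, pvg_eq_pyGetD s _ (by omega)]
    · rw [if_neg h, pvg_neg s _ (by omega)]; ring
  rw [e1, e2, e6, e12, ← pvF_rec]

lemma foldA (s : List Int) : ∀ n, n ≤ s.length →
    ((PySem.List.enumerate s).take n).foldl (lpfStep s) []
      = (PySem.List.pyRange 0 (n : Int) 1).map (fun i => pvF s i) := by
  intro n
  induction n with
  | zero => intro _; simp [PySem.List.pyRange]
  | succ n ih =>
      intro h
      have hn : n < s.length := by omega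
      have htake : (PySem.List.enumerate s).take (n + 1)
          = (PySem.List.enumerate s).take n ++ [((n : Int), s[n])] := by
        rw [List.take_add_one, PySem.List.getElem?_enumerate]
        simp [List.getElem?_eq_getElem hn]
      rw [htake, List.foldl_append, ih (by omega)]
      have hget : s[n] = s.getD n 0 := (List.getD_eq_getElem s 0 hn).symm
      rw [List.foldl_cons, List.foldl_nil, hget,
        chain_val s n _ rfl]
      have hr : PySem.List.pyRange 0 ((n : Int) + 1) 1
          = PySem.List.pyRange 0 (n : Int) 1 ++ [(n : Int)] := by
        rw [PySem.List.pyRange_one_succ_right] ; omega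
      push_cast
      rw [hr, List.map_append]
      rfl

-- ===== VERDICT (by name: the statement is the Claim_ definition above) =====
theorem low_pass_filter_py_spec : Claim_equal_low_pass_filter_py := by
  intro signal _
  unfold Spec_low_pass_filter_py low_pass_filter_py low_pass_filter_py_alt
  have hfun : (fun i => lpfTaps signal i (PySem.List.enumerate lpfKernel) 0)
      = fun i => pvF signal i := by
    funext i; exact taps_kernel signal i
  rw [hfun]
  have hlen : (PySem.List.enumerate signal).take signal.length = PySem.List.enumerate signal := by
    rw [← PySem.List.length_enumerate (xs := signal) (s := 0)]
    exact List.take_length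
  have := foldA signal signal.length le_rfl
  rwa [hlen] at this
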